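-- pv_equiv track=rewrite | github.com/ivytam2000/sat-voice-teacher | server/speech_synthesis.py | sentence_to_ssml
-- ===== SOURCE A (Python) =====
-- non_exercise_ssml = {"full_stop": '<break time=".2s"/>', "pause": '<break time=".1s"/>', "paragraph": '<break time=".4s"/>', "exclamation_start":'<prosody volume="+6dB">', "exclamation_end": '</prosody><break time=".2s"/>', "speech_start": '<prosody rate="80%">', "speech_end": '</prosody><break time=".1s"/>'}
--
-- exercise_ssml = {"full_stop": '<break time=".4s"/>', "pause": '<break time=".2s"/>', "paragraph": '<break time=".6s"/>', "exclamation_start":'<prosody volume="+6dB">', "exclamation_end": '</prosody><break time=".4s"/>', "speech_start": '<prosody rate="65%">', "speech_end": '</prosody><break time=".1s"/>'}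
--
-- def sentence_to_ssml(sentence, is_exercise=False ):
--     ssml_dict = exercise_ssml if is_exercise else non_exercise_ssml
--     modified_sentence = ""
--     speech_mark_count = 0
--
--     for char in sentence:
--         if char == '"':
--             speech_mark_count += 1
--             if speech_mark_count == 1:
--                 modified_sentence += ssml_dict["speech_start"]
--             elif speech_mark_count == 2:
--                 modified_sentence += ssml_dict["speech_end"]
--         else:
--             modified_sentence += char
--     modified_sentence = modified_sentence.strip()
--
--     if sentence[-1] == '!':
--         return ssml_dict["exclamation_start"] + modified_sentence + ssml_dict["exclamation_end"]
--     else: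
--         return modified_sentence.strip() + ssml_dict["full_stop"]
-- ===== SOURCE B (Python) =====
-- non_exercise_ssml = {"full_stop": '<break time=".2s"/>', "pause": '<break time=".1s"/>', "paragraph": '<break time=".4s"/>', "exclamation_start":'<prosody volume="+6dB">', "exclamation_end": '</prosody><break time=".2s"/>', "speech_start": '<prosody rate="80%">', "speech_end": '</prosody><break time=".1s"/>'}
--
-- exercise_ssml = {"full_stop": '<break time=".4s"/>', "pause": '<break time=".2s"/>', "paragraph": '<break time=".6s"/>', "exclamation_start":'<prosody volume="+6dB">', "exclamation_end": '</prosody><break time=".4s"/>', "speech_start": '<prosody rate="65%">', "speech_end": '</prosody><break time=".1s"/>'}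
--
-- def sentence_to_ssml(sentence, is_exercise=False):
--     # split once on '"' instead of scanning char by char with a counter
--     ssml_dict = exercise_ssml if is_exercise else non_exercise_ssml
--     parts = sentence.split('"')
--     modified_sentence = parts[0]
--     if len(parts) >= 2:
--         modified_sentence += ssml_dict["speech_start"] + parts[1]
--     if len(parts) >= 3:
--         modified_sentence += ssml_dict["speech_end"] + parts[2] + "".join(parts[3:])
--     modified_sentence = modified_sentence.strip()
--     if sentence.endswith('!'):
--         return ssml_dict["exclamation_start"] + modified_sentence + ssml_dict["exclamation_end"]
--     return modified_sentence.strip() + ssml_dict["full_stop"]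
-- ===== Notes on version B (the rewrite author's own statement) =====
-- stated objective: faster
-- what changed: Replaces the character-by-character scan with a quote counter (repeated one-char string appends) by a single str.split on the quote character followed by positional reassembly of the first three segments (tag-inserted) and the joined remainder, testing the trailing exclamation mark with endswith.
import Mathlib
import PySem

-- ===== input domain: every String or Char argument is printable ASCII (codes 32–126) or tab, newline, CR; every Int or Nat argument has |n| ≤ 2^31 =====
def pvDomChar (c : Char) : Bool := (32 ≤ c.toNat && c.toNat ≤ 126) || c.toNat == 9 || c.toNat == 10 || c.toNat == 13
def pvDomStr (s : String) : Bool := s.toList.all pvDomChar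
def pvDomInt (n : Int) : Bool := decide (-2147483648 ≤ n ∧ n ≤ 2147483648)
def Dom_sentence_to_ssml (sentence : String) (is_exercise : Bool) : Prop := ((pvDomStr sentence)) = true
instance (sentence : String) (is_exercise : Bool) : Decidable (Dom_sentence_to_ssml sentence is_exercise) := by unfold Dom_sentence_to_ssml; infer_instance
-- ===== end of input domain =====

-- B replaces A's char-by-char scan (quote counter) by one split on '"' plus positional
-- reassembly; equal on every non-empty sentence (A raises IndexError on "").

-- ===== PORT A =====
def non_exercise_ssml : PySem.Dict String String := PySem.Dict.ofList
  [("full_stop", "<break time=\".2s\"/>"), ("pause", "<break time=\".1s\"/>"),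
   ("paragraph", "<break time=\".4s\"/>"), ("exclamation_start", "<prosody volume=\"+6dB\">"),
   ("exclamation_end", "</prosody><break time=\".2s\"/>"), ("speech_start", "<prosody rate=\"80%\">"),
   ("speech_end", "</prosody><break time=\".1s\"/>")]

def exercise_ssml : PySem.Dict String String := PySem.Dict.ofList
  [("full_stop", "<break time=\".4s\"/>"), ("pause", "<break time=\".2s\"/>"),
   ("paragraph", "<break time=\".6s\"/>"), ("exclamation_start", "<prosody volume=\"+6dB\">"),
   ("exclamation_end", "</prosody><break time=\".4s\"/>"), ("speech_start", "<prosody rate=\"65%\">"),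
   ("speech_end", "</prosody><break time=\".1s\"/>")]

-- one step of A's `for char in sentence` loop: state = (modified_sentence, speech_mark_count)
def ssmlStep (ss se : List Char) (st : List Char × Nat) (c : Char) : List Char × Nat :=
  if c = '"' then
    let k := st.2 + 1
    if k = 1 then (st.1 ++ ss, k)
    else if k = 2 then (st.1 ++ se, k)
    else (st.1, k)
  else (st.1 ++ [c], st.2)

def sentence_to_ssml (sentence : String) (is_exercise : Bool) : String :=
  let d := if is_exercise then exercise_ssml else non_exercise_ssml
  let ms := (sentence.toList.foldl
      (ssmlStep (d.getD "speech_start" "").toList (d.getD "speech_end" "").toList) ([], 0)).1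
  let ms := PySem.Chars.strip ms
  match PySem.List.pyGet? sentence.toList (-1) with   -- sentence[-1]: none = IndexError, excluded by Pre_
  | some c =>
      if c = '!' then
        String.mk ((d.getD "exclamation_start" "").toList ++ ms ++ (d.getD "exclamation_end" "").toList)
      else
        String.mk (PySem.Chars.strip ms ++ (d.getD "full_stop" "").toList)
  | none => ""

-- ===== PORT B =====
def sentence_to_ssml_alt (sentence : String) (is_exercise : Bool) : String :=
  let d := if is_exercise then exercise_ssml else non_exercise_ssml
  let parts := PySem.Chars.splitOn sentence.toList ['"']
  let ms :=
    match parts with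
    | [] => []          -- unreachable: split never returns an empty list
    | p0 :: rest =>
      p0 ++
        match rest with
        | [] => []
        | p1 :: rest2 =>
          (d.getD "speech_start" "").toList ++ p1 ++
            match rest2 with
            | [] => []
            | p2 :: rest3 => (d.getD "speech_end" "").toList ++ p2 ++ rest3.flatten
  let ms := PySem.Chars.strip ms
  if PySem.Chars.endswith sentence.toList ['!'] then
    String.mk ((d.getD "exclamation_start" "").toList ++ ms ++ (d.getD "exclamation_end" "").toList)
  else
    String.mk (PySem.Chars.strip ms ++ (d.getD "full_stop" "").toList)

-- ===== PRECONDITION & SPEC =====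
-- Pre_ excludes only the empty sentence, where A raises IndexError at sentence[-1].
def Pre_sentence_to_ssml (sentence : String) (is_exercise : Bool) : Prop := sentence ≠ ""
instance (sentence : String) (is_exercise : Bool) : Decidable (Pre_sentence_to_ssml sentence is_exercise) := by unfold Pre_sentence_to_ssml; infer_instance
def pvWitness_sentence_to_ssml : String × Bool := ("She said \"hi\" loudly!", false)

def Spec_sentence_to_ssml (sentence : String) (is_exercise : Bool) (out : String) : Prop := out = sentence_to_ssml_alt sentence is_exercise
instance (sentence : String) (is_exercise : Bool) (out : String) : Decidable (Spec_sentence_to_ssml sentence is_exercise out) := by unfold Spec_sentence_to_ssml; infer_instance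

-- ===== CLAIM (what is proved, stated in full; the proofs are below) =====
def Claim_equal_sentence_to_ssml : Prop := ∀ (sentence : String) (is_exercise : Bool), Dom_sentence_to_ssml sentence is_exercise → Pre_sentence_to_ssml sentence is_exercise → Spec_sentence_to_ssml sentence is_exercise (sentence_to_ssml sentence is_exercise)

-- ===== LEMMAS AND PROOFS =====

-- structural single-character split (proof-side model of str.split('"'))
def splitQ (q : Char) : List Char → List (List Char)
  | [] => [[]]
  | c :: cs => if c = q then [] :: splitQ q cs else (splitQ q cs).modifyHead (c :: ·)

theorem splitQ_ne_nil (q : Char) (l : List Char) : splitQ q l ≠ [] := by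
  induction l with
  | nil => simp [splitQ]
  | cons c cs ih =>
    simp only [splitQ]
    split
    · simp
    · cases h : splitQ q cs with
      | nil => exact absurd h ih
      | cons p ps => simp [List.modifyHead]

theorem go_eq (q : Char) : ∀ (fuel : Nat) (l cur acc : _), l.length < fuel →
    PySem.Chars.splitOn.go [q] fuel l cur acc
      = acc.reverse ++ (splitQ q l).modifyHead (cur.reverse ++ ·) := by
  intro fuel
  induction fuel with
  | zero => intro l cur acc h; omega
  | succ f ih =>
    intro l cur acc h
    cases l with
    | nil => simp [PySem.Chars.splitOn.go, splitQ]
    | cons c cs =>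
      by_cases hc : c = q
      · subst hc
        have : [c].isPrefixOf (c :: cs) = true := by simp [List.isPrefixOf]
        simp only [PySem.Chars.splitOn.go, this, if_pos]
        have hd : List.drop [c].length (c :: cs) = cs := by simp
        rw [hd, ih cs [] (cur.reverse :: acc) (by simpa using Nat.lt_of_succ_lt_succ h)]
        simp [splitQ]
        cases hs : splitQ c cs with
        | nil => exact absurd hs (splitQ_ne_nil c cs)
        | cons p ps => simp [List.modifyHead]
      · have : [q].isPrefixOf (c :: cs) = false := by
          simp [List.isPrefixOf]; exact fun hqc => hc hqc.symm
        simp only [PySem.Chars.splitOn.go, this]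
        rw [ih cs (c :: cur) acc (by simpa using Nat.lt_of_succ_lt_succ h)]
        simp only [splitQ, if_neg hc]
        cases hs : splitQ q cs with
        | nil => exact absurd hs (splitQ_ne_nil q cs)
        | cons p ps => simp [List.modifyHead]

theorem splitOn_eq_splitQ (q : Char) (l : List Char) :
    PySem.Chars.splitOn l [q] = splitQ q l := by
  rw [PySem.Chars.splitOn, go_eq q (l.length + 1) l [] [] (by omega)]
  cases hs : splitQ q l with
  | nil => exact absurd hs (splitQ_ne_nil q l)
  | cons p ps => simp [List.modifyHead]

-- A's loop after the second quote just drops every '"'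
theorem loop2 (ss se : List Char) : ∀ (cs acc : List Char) (k : Nat), 2 ≤ k →
    (cs.foldl (ssmlStep ss se) (acc, k)).1 = acc ++ (splitQ '"' cs).flatten := by
  intro cs
  induction cs with
  | nil => intro acc k hk; simp [splitQ]
  | cons c cs ih =>
    intro acc k hk
    by_cases hc : c = '"'
    · subst hc
      have h1 : ¬ (k + 1 = 1) := by omega
      have h2 : ¬ (k + 1 = 2) := by omega
      have hstep : ssmlStep ss se (acc, k) '"' = (acc, k + 1) := by
        simp [ssmlStep, (show ¬ k = 0 by omega), (show ¬ k = 1 by omega)]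
      simp only [List.foldl_cons, hstep]
      rw [ih acc (k + 1) (by omega)]
      simp [splitQ]
    · have hstep : ssmlStep ss se (acc, k) c = (acc ++ [c], k) := by
        simp [ssmlStep, hc]
      simp only [List.foldl_cons, hstep]
      rw [ih (acc ++ [c]) k hk]
      simp only [splitQ, if_neg hc]
      cases hs : splitQ '"' cs with
      | nil => exact absurd hs (splitQ_ne_nil _ _)
      | cons p ps => simp [List.modifyHead]

-- A's loop after the first quote: next quote emits se, later quotes vanish
theorem loop1 (ss se : List Char) : ∀ (cs acc : List Char),
    (cs.foldl (ssmlStep ss se) (acc, 1)).1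
      = acc ++ (match splitQ '"' cs with
                | [] => []
                | p1 :: rest2 =>
                  p1 ++ match rest2 with
                        | [] => []
                        | p2 :: rest3 => se ++ p2 ++ rest3.flatten) := by
  intro cs
  induction cs with
  | nil => intro acc; simp [splitQ]
  | cons c cs ih =>
    intro acc
    by_cases hc : c = '"'
    · subst hc
      have hstep : ssmlStep ss se (acc, 1) '"' = (acc ++ se, 2) := by
        simp [ssmlStep]
      simp only [List.foldl_cons, hstep]
      rw [loop2 ss se cs (acc ++ se) 2 (by omega)]
      simp only [splitQ]
      cases hs : splitQ '"' cs with
      | nil => exact absurd hs (splitQ_ne_nil _ _)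
      | cons p ps => simp
    · have hstep1 : ssmlStep ss se (acc, 1) c = (acc ++ [c], 1) := by
        simp [ssmlStep, hc]
      simp only [List.foldl_cons, hstep1]
      rw [ih (acc ++ [c])]
      simp only [splitQ, if_neg hc]
      cases hs : splitQ '"' cs with
      | nil => exact absurd hs (splitQ_ne_nil _ _)
      | cons p ps => simp [List.modifyHead]

-- A's whole loop = B's positional reassembly of the split
theorem loop0 (ss se : List Char) : ∀ (cs acc : List Char),
    (cs.foldl (ssmlStep ss se) (acc, 0)).1
      = acc ++ (match splitQ '"' cs with
                | [] => []
                | p0 :: rest =>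
                  p0 ++ match rest with
                        | [] => []
                        | p1 :: rest2 =>
                          ss ++ p1 ++ match rest2 with
                                      | [] => []
                                      | p2 :: rest3 => se ++ p2 ++ rest3.flatten) := by
  intro cs
  induction cs with
  | nil => intro acc; simp [splitQ]
  | cons c cs ih =>
    intro acc
    by_cases hc : c = '"'
    · subst hc
      have hstep : ssmlStep ss se (acc, 0) '"' = (acc ++ ss, 1) := by
        simp [ssmlStep]
      simp only [List.foldl_cons, hstep]
      rw [loop1 ss se cs (acc ++ ss)]
      simp only [splitQ]
      cases hs : splitQ '"' cs with
      | nil => exact absurd hs (splitQ_ne_nil _ _)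
      | cons p ps => simp
    · have hstep0 : ssmlStep ss se (acc, 0) c = (acc ++ [c], 0) := by
        simp [ssmlStep, hc]
      simp only [List.foldl_cons, hstep0]
      rw [ih (acc ++ [c])]
      simp only [splitQ, if_neg hc]
      cases hs : splitQ '"' cs with
      | nil => exact absurd hs (splitQ_ne_nil _ _)
      | cons p ps => simp [List.modifyHead]

-- sentence[-1] on non-empty input is its last character
theorem pyGet_neg_one (init : List Char) (lst : Char) :
    PySem.List.pyGet? (init ++ [lst]) (-1) = some lst :=
  PySem.List.pyGet?_neg_one_append_singleton init lst

-- sentence.endswith('!') tests the last character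
theorem endswith_last (init : List Char) (lst : Char) :
    PySem.Chars.endswith (init ++ [lst]) ['!'] = true ↔ lst = '!' := by
  rw [PySem.Chars.endswith_iff]
  constructor
  · rintro ⟨t, ht⟩
    have h2 := congrArg (List.getLast? ·) ht
    exact (show ('!' : Char) = lst by simpa using h2).symm
  · rintro rfl; exact ⟨init, rfl⟩

-- every non-empty list is init ++ [last]
theorem exists_append_singleton (cs : List Char) (h : cs ≠ []) :
    ∃ init lst, cs = init ++ [lst] :=
  ⟨cs.dropLast, cs.getLast h, by simp [List.dropLast_append_getLast]⟩

-- ===== VERDICT (by name: the statement is the Claim_ definition above) =====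
theorem sentence_to_ssml_spec : Claim_equal_sentence_to_ssml := by
  intro s b _ hp
  unfold Spec_sentence_to_ssml sentence_to_ssml sentence_to_ssml_alt
  have hne : s.toList ≠ [] := by simpa using hp
  obtain ⟨init, lst, hcs⟩ := exists_append_singleton s.toList hne
  dsimp only
  rw [hcs, splitOn_eq_splitQ, pyGet_neg_one,
      loop0 (((if b then exercise_ssml else non_exercise_ssml).getD "speech_start" "").toList)
            (((if b then exercise_ssml else non_exercise_ssml).getD "speech_end" "").toList)
            (init ++ [lst]) []]
  simp only [List.nil_append]
  by_cases hl : lst = '!'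
  · rw [if_pos ((endswith_last init lst).mpr hl), if_pos hl]
  · have hb : ¬ (PySem.Chars.endswith (init ++ [lst]) ['!'] = true) := by
      rw [endswith_last init lst]; exact hl
    rw [if_neg hl, if_neg hb]
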